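-- pv_equiv track=rewrite | github.com/schtoffer/kb_brreg | brreg_lookup.py | _preserves_word_order
-- ===== SOURCE A (Python) =====
-- def _preserves_word_order(query: str, name: str) -> bool:
--     """
--     Check if the word order from query is preserved in the organization name.
--
--     This method checks if all words from the query appear in the same order
--     within the organization name, which indicates a more relevant match.
--
--     Args:
--         query: The search query
--         name: The organization name
--
--     Returns:
--         True if word order is preserved, False otherwise
--     """
--     query_words = query.split()
--     name_words = name.split()
--
--     query_index = 0
--     for word in name_words:
--         if query_index < len(query_words) and word == query_words[query_index]:
--             query_index += 1
--
--     return query_index == len(query_words)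
-- ===== SOURCE B (Python) =====
-- def _preserves_word_order(query: str, name: str) -> bool:
--     # Inverted index: each name word -> sorted list of its positions;
--     # then resolve each query word by binary search for the first
--     # occurrence at or after the current threshold.
--     positions = {}
--     for i, w in enumerate(name.split()):
--         positions.setdefault(w, []).append(i)
--     pos = 0
--     for qw in query.split():
--         lst = positions.get(qw, [])
--         lo, hi = 0, len(lst)
--         while lo < hi:
--             mid = (lo + hi) // 2
--             if lst[mid] < pos:
--                 lo = mid + 1
--             else:
--                 hi = mid
--         if lo == len(lst):
--             return False
--         pos = lst[lo] + 1
--     return True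
-- ===== Notes on version B (the rewrite author's own statement) =====
-- stated objective: alternative
-- what changed: Replaces A's single linear scan of the name words with an integer cursor by a two-stage algorithm: first build an inverted index mapping each name word to its sorted position list, then resolve each query word by binary search for its first occurrence at or after the current threshold.
import Mathlib
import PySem

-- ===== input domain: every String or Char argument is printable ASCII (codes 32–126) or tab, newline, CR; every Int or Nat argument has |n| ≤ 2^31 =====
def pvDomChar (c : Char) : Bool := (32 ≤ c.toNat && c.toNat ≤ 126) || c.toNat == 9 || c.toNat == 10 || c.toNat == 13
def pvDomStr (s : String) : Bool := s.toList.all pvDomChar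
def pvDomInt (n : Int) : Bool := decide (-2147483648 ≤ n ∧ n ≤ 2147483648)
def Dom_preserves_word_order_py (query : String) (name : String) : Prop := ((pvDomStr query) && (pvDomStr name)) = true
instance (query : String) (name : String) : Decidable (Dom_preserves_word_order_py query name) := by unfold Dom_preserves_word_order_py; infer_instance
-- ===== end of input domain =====

-- B replaces A's single linear scan with an integer cursor by a two-stage algorithm:
-- an inverted index (name word -> sorted position list) plus a binary search per query word.

-- ===== PORT A =====
-- A: query_index := 0; for word in name_words: if query_index < len(qws) and word == qws[query_index]: query_index += 1
def preserves_word_order_py (query : String) (name : String) : Bool :=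
  let query_words := PySem.Str.split₀ query
  let name_words := PySem.Str.split₀ name
  let query_index := name_words.foldl
    (fun qi w => if qi < query_words.length ∧ query_words.getD qi "" = w then qi + 1 else qi) 0
  query_index == query_words.length

-- ===== PORT B =====
-- B: while lo < hi: mid = (lo+hi)//2; if lst[mid] < pos: lo = mid+1 else hi = mid
-- (lst[mid] is always in range since 0 ≤ lo ≤ mid < hi ≤ len(lst); getD renders that access)
def pvBisect (lst : List Int) (pos : Int) (lo hi : Nat) : Nat :=
  if h : lo < hi then
    if lst.getD ((lo + hi) / 2) 0 < pos then pvBisect lst pos ((lo + hi) / 2 + 1) hi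
    else pvBisect lst pos lo ((lo + hi) / 2)
  else lo
termination_by hi - lo
decreasing_by all_goals omega

-- B: for qw in query.split(): lst = positions.get(qw, []); <binary search>; early returns
def pvGoB (d : PySem.Dict String (List Int)) : List String → Int → Bool
  | [], _ => true
  | qw :: rest, pos =>
    let lst := d.getD qw []
    let lo := pvBisect lst pos 0 lst.length
    if lo == lst.length then false
    else pvGoB d rest (lst.getD lo 0 + 1)

-- B: positions = {}; for i, w in enumerate(name.split()): positions.setdefault(w, []).append(i)
def preserves_word_order_py_alt (query : String) (name : String) : Bool :=
  let nws := PySem.Str.split₀ name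
  let d := (PySem.List.enumerate nws 0).foldl
    (fun d p => d.insert p.2 (d.getD p.2 [] ++ [p.1])) PySem.Dict.empty
  pvGoB d (PySem.Str.split₀ query) 0

-- ===== PRECONDITION & SPEC =====
def Spec_preserves_word_order_py (query : String) (name : String) (out : Bool) : Prop := out = preserves_word_order_py_alt query name
instance (query : String) (name : String) (out : Bool) : Decidable (Spec_preserves_word_order_py query name out) := by unfold Spec_preserves_word_order_py; infer_instance

-- ===== CLAIM (what is proved, stated in full; the proofs are below) =====
def Claim_equal_preserves_word_order_py : Prop := ∀ (query : String) (name : String), Dom_preserves_word_order_py query name → Spec_preserves_word_order_py query name (preserves_word_order_py query name)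

-- ===== LEMMAS AND PROOFS =====

-- reference semantics: greedy consume of the first occurrence
def pvConsume (qw : String) : List String → Option (List String)
  | [] => none
  | n :: ns => if n = qw then some ns else pvConsume qw ns

def pvAllIn : List String → List String → Bool
  | [], _ => true
  | qw :: qws, it =>
    match pvConsume qw it with
    | none => false
    | some it' => pvAllIn qws it'

-- positions of qw in ns, absolute indices starting at k
def pvOcc (qw : String) (k : Int) : List String → List Int
  | [] => []
  | n :: ns => if n = qw then k :: pvOcc qw (k + 1) ns else pvOcc qw (k + 1) ns

theorem pv_getD_eq (l : List Int) (i : Nat) (h : i < l.length) : l.getD i 0 = l[i] := by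
  simp [List.getD_eq_getElem?_getD, List.getElem?_eq_getElem h]

theorem pvOcc_bounds (qw : String) : ∀ (ns : List String) (k : Int),
    ∀ x ∈ pvOcc qw k ns, k ≤ x ∧ x < k + ns.length := by
  intro ns
  induction ns with
  | nil => intro k x hx; simp [pvOcc] at hx
  | cons n ns ih =>
    intro k x hx
    simp only [pvOcc] at hx
    simp only [List.length_cons]
    split_ifs at hx with h
    · rcases List.mem_cons.mp hx with rfl | hx
      · omega
      · have := ih (k + 1) x hx; omega
    · have := ih (k + 1) x hx; omega

theorem pvOcc_sorted (qw : String) : ∀ (ns : List String) (k : Int),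
    (pvOcc qw k ns).Pairwise (· < ·) := by
  intro ns
  induction ns with
  | nil => intro k; simp [pvOcc]
  | cons n ns ih =>
    intro k
    simp only [pvOcc]
    split_ifs with h
    · exact List.pairwise_cons.mpr
        ⟨fun x hx => by have := pvOcc_bounds qw ns (k + 1) x hx; omega, ih (k + 1)⟩
    · exact ih (k + 1)

theorem pvOcc_eq_nil_iff (qw : String) : ∀ (ns : List String) (k : Int),
    pvOcc qw k ns = [] ↔ qw ∉ ns := by
  intro ns
  induction ns with
  | nil => simp [pvOcc]
  | cons n ns ih =>
    intro k
    simp only [pvOcc]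
    split_ifs with h
    · simp [h]
    · simp [ih (k + 1)]; tauto

-- the dict built by B's first loop holds exactly the position lists
theorem pvBuild_getD (qw : String) : ∀ (ns : List String) (s : Int) (d0 : PySem.Dict String (List Int)),
    ((PySem.List.enumerate ns s).foldl (fun d p => d.insert p.2 (d.getD p.2 [] ++ [p.1])) d0).getD qw []
      = d0.getD qw [] ++ pvOcc qw s ns := by
  intro ns
  induction ns with
  | nil => intro s d0; simp [PySem.List.enumerate_nil, pvOcc]
  | cons n ns ih =>
    intro s d0
    rw [PySem.List.enumerate_cons, List.foldl_cons, ih]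
    simp only [pvOcc, PySem.Dict.getD_insert]
    by_cases h : n = qw
    · simp [h]
    · have h' : qw ≠ n := fun hh => h hh.symm
      simp [h, h']

-- dropping the first p words shifts the occurrence list
theorem pvOcc_drop (qw : String) : ∀ (p : Nat) (ns : List String) (k : Int),
    List.dropWhile (fun x => decide (x < k + p)) (pvOcc qw k ns) = pvOcc qw (k + p) (ns.drop p) := by
  intro p
  induction p with
  | zero =>
    intro ns k
    simp only [Nat.cast_zero, Int.add_zero, List.drop_zero]
    apply List.dropWhile_eq_self_iff.mpr
    intro h
    have := pvOcc_bounds qw ns k _ (List.getElem_mem h)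
    simp only [decide_eq_true_eq]
    omega
  | succ p ih =>
    intro ns k
    cases ns with
    | nil => simp [pvOcc]
    | cons n ns =>
      have hk : (fun (x : Int) => decide (x < k + ((p : Int) + 1)))
          = (fun x => decide (x < (k + 1) + (p : Int))) := by
        funext x
        exact decide_eq_decide.mpr (by constructor <;> intro <;> omega)
      simp only [pvOcc, List.drop_succ_cons, Nat.cast_succ]
      split_ifs with h
      · rw [List.dropWhile_cons_of_pos (by simp only [decide_eq_true_eq]; omega), hk, ih ns (k + 1)]
        congr 1; omega
      · rw [hk, ih ns (k + 1)]
        congr 1; omega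

-- pvConsume via the head of the occurrence list
theorem pvConsume_of_occ (qw : String) : ∀ (ns : List String) (k j : Int) (rest : List Int),
    pvOcc qw k ns = j :: rest → pvConsume qw ns = some (ns.drop (j - k + 1).toNat) := by
  intro ns
  induction ns with
  | nil => intro k j rest h; simp [pvOcc] at h
  | cons n ns ih =>
    intro k j rest h
    simp only [pvOcc] at h
    split_ifs at h with hn
    · injection h with h1 h2
      subst h1
      have hone : (k - k + 1).toNat = 1 := by omega
      simp [pvConsume, hn]
    · have hrec := ih (k + 1) j rest h
      have hj : k + 1 ≤ j := (pvOcc_bounds qw ns (k + 1) j (h ▸ List.mem_cons_self ..)).1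
      simp only [pvConsume, if_neg hn, hrec]
      congr 1
      have hstep : (j - k + 1).toNat = (j - (k + 1) + 1).toNat + 1 := by omega
      rw [hstep, List.drop_succ_cons]

theorem pvConsume_eq_none_iff (qw : String) : ∀ (ns : List String),
    pvConsume qw ns = none ↔ qw ∉ ns := by
  intro ns
  induction ns with
  | nil => simp [pvConsume]
  | cons n ns ih =>
    simp only [pvConsume]
    split_ifs with h
    · simp [h]
    · simp [ih]; tauto

-- the lengths of takeWhile and dropWhile sum to the list length
theorem pv_tw_dw_len (p : Int → Bool) (lst : List Int) :
    (lst.takeWhile p).length + (lst.dropWhile p).length = lst.length := by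
  have h2 := congrArg List.length (lst.takeWhile_append_dropWhile (p := p))
  rw [List.length_append] at h2
  exact h2

-- the element at index (takeWhile length) is the head of dropWhile
theorem pv_getElem_tw_len (p : Int → Bool) (lst : List Int)
    (ht_lt : (lst.takeWhile p).length < lst.length) (hdw : lst.dropWhile p ≠ []) :
    lst[(lst.takeWhile p).length] = (lst.dropWhile p).head hdw := by
  have h4 : lst[(lst.takeWhile p).length]? = (lst.dropWhile p)[0]? := by
    have h2 := lst.takeWhile_append_dropWhile (p := p)
    calc lst[(lst.takeWhile p).length]?
        = (lst.takeWhile p ++ lst.dropWhile p)[(lst.takeWhile p).length]? := by rw [h2]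
      _ = (lst.dropWhile p)[0]? := by
          rw [List.getElem?_append_right (Nat.le_refl _)]
          simp
  rw [List.getElem?_eq_getElem ht_lt,
      List.getElem?_eq_getElem (List.length_pos_iff.mpr hdw)] at h4
  rw [List.head_eq_getElem hdw]
  exact Option.some.inj h4

-- sorted-list characterisation of the takeWhile length
theorem pv_lt_iff_lt_tw (lst : List Int) (pos : Int) (hs : lst.Pairwise (· < ·))
    (m : Nat) (hm : m < lst.length) :
    lst[m] < pos ↔ m < (lst.takeWhile (fun x => decide (x < pos))).length := by
  set t := (lst.takeWhile (fun x => decide (x < pos))).length with ht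
  constructor
  · intro hlt
    by_contra hge0
    have hge : t ≤ m := Nat.le_of_not_lt hge0
    have ht_lt : t < lst.length := lt_of_le_of_lt hge hm
    have hdw : lst.dropWhile (fun x => decide (x < pos)) ≠ [] := by
      intro hnil
      have := pv_tw_dw_len (fun x => decide (x < pos)) lst
      rw [hnil] at this; simp at this; omega
    have hhead := List.head_dropWhile_not (fun x => decide (x < pos)) hdw
    have hgt : ¬ lst[t] < pos := by
      rw [pv_getElem_tw_len _ _ ht_lt hdw]
      simpa using hhead
    rcases Nat.lt_or_ge t m with h | h
    · have := (List.pairwise_iff_getElem.mp hs) t m ht_lt hm h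
      omega
    · have : t = m := by omega
      subst this; omega
  · intro hlt
    have hpre := lst.takeWhile_prefix (p := fun x => decide (x < pos))
    have heq : lst[m] = (lst.takeWhile (fun x => decide (x < pos)))[m]'hlt :=
      (List.IsPrefix.getElem hpre hlt).symm
    rw [heq]
    have := List.mem_takeWhile_imp (List.getElem_mem hlt)
    simpa using this

-- B's hand-written binary search finds the takeWhile length
theorem pvBisect_spec (lst : List Int) (pos : Int) (hs : lst.Pairwise (· < ·)) :
    ∀ (lo hi : Nat), lo ≤ (lst.takeWhile (fun x => decide (x < pos))).length →
      (lst.takeWhile (fun x => decide (x < pos))).length ≤ hi → hi ≤ lst.length →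
      pvBisect lst pos lo hi = (lst.takeWhile (fun x => decide (x < pos))).length := by
  intro lo hi
  induction hn : hi - lo using Nat.strong_induction_on generalizing lo hi with
  | _ n ih =>
    intro h1 h2 h3
    set t := (lst.takeWhile (fun x => decide (x < pos))).length with ht
    unfold pvBisect
    by_cases h : lo < hi
    · have hmid : (lo + hi) / 2 < lst.length := by omega
      rw [dif_pos h, pv_getD_eq lst _ hmid]
      by_cases hc : lst[(lo + hi) / 2]'hmid < pos
      · have hlt : (lo + hi) / 2 < t := (pv_lt_iff_lt_tw lst pos hs _ hmid).mp hc
        rw [if_pos hc]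
        exact ih (hi - ((lo + hi) / 2 + 1)) (by omega) _ _ rfl (by omega) h2 h3
      · have hge : t ≤ (lo + hi) / 2 := by
          by_contra hlt
          exact hc ((pv_lt_iff_lt_tw lst pos hs _ hmid).mpr (by omega))
        rw [if_neg hc]
        exact ih ((lo + hi) / 2 - lo) (by omega) _ _ rfl h1 hge (by omega)
    · rw [dif_neg h]
      omega

-- main loop correspondence: B's threshold loop computes the greedy consume semantics
theorem pvGoB_eq_pvAllIn (ns : List String) (d : PySem.Dict String (List Int))
    (hd : ∀ qw, d.getD qw [] = pvOcc qw 0 ns) :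
    ∀ (qws : List String) (pos : Int), 0 ≤ pos → pos ≤ ns.length →
      pvGoB d qws pos = pvAllIn qws (ns.drop pos.toNat) := by
  intro qws
  induction qws with
  | nil => intro pos _ _; simp [pvGoB, pvAllIn]
  | cons qw rest ih =>
    intro pos h0 hlen
    simp only [pvGoB, pvAllIn, hd qw]
    set lst := pvOcc qw 0 ns with hlst
    have hs : lst.Pairwise (· < ·) := pvOcc_sorted qw ns 0
    set t := (lst.takeWhile (fun x => decide (x < pos))).length with htdef
    have htle : t ≤ lst.length := (lst.takeWhile_prefix (p := fun x => decide (x < pos))).length_le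
    have hb : pvBisect lst pos 0 lst.length = t :=
      pvBisect_spec lst pos hs 0 lst.length (by omega) htle le_rfl
    have hdrop : List.dropWhile (fun x => decide (x < pos)) lst = pvOcc qw pos (ns.drop pos.toNat) := by
      have hgen := pvOcc_drop qw pos.toNat ns 0
      have hcast : ((pos.toNat : Int)) = pos := by omega
      rw [Int.zero_add, hcast] at hgen
      exact hgen
    rw [hb]
    by_cases hE : t = lst.length
    · -- no occurrence at or after pos: both sides are false
      have hnil : pvOcc qw pos (ns.drop pos.toNat) = [] := by
        rw [← hdrop]
        have := pv_tw_dw_len (fun x => decide (x < pos)) lst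
        have hz : (List.dropWhile (fun x => decide (x < pos)) lst).length = 0 := by omega
        exact List.length_eq_zero_iff.mp hz
      have hnone : pvConsume qw (ns.drop pos.toNat) = none :=
        (pvConsume_eq_none_iff qw _).mpr ((pvOcc_eq_nil_iff qw _ pos).mp hnil)
      simp [hE, hnone]
    · have htlt : t < lst.length := by omega
      rw [if_neg (by simpa using hE)]
      have hdw : List.dropWhile (fun x => decide (x < pos)) lst ≠ [] := by
        intro hnil
        have := pv_tw_dw_len (fun x => decide (x < pos)) lst
        rw [hnil] at this; simp at this; omega
      obtain ⟨j, rest', hocc⟩ : ∃ j rest', pvOcc qw pos (ns.drop pos.toNat) = j :: rest' := by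
        rw [← hdrop]
        rcases h' : List.dropWhile (fun x => decide (x < pos)) lst with _ | ⟨j, rest'⟩
        · exact absurd h' hdw
        · exact ⟨j, rest', rfl⟩
      have hdj : List.dropWhile (fun x => decide (x < pos)) lst = j :: rest' := hdrop.trans hocc
      have hget : lst.getD t 0 = j := by
        rw [pv_getD_eq lst t htlt, pv_getElem_tw_len _ _ htlt hdw]
        simp [hdj]
      have hjb := pvOcc_bounds qw (ns.drop pos.toNat) pos j (hocc ▸ List.mem_cons_self ..)
      have hjlen : j < ns.length := by
        have := ns.length_drop (i := pos.toNat); omega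
      have hcons := pvConsume_of_occ qw (ns.drop pos.toNat) pos j rest' hocc
      have hstep : (ns.drop pos.toNat).drop (j - pos + 1).toNat = ns.drop (j + 1).toNat := by
        rw [List.drop_drop]
        congr 1; omega
      rw [hget, hcons, hstep]
      exact ih (j + 1) (by omega) (by omega)

-- A's fold equals the greedy consume semantics (loop invariant on the query index)
theorem pv_main (qws : List String) : ∀ (ns : List String) (qi : Nat), qi ≤ qws.length →
    ((ns.foldl (fun qi w => if qi < qws.length ∧ qws.getD qi "" = w then qi + 1 else qi) qi)
      == qws.length) = pvAllIn (qws.drop qi) ns := by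
  intro ns
  induction ns with
  | nil =>
    intro qi hle
    simp only [List.foldl]
    rcases Nat.lt_or_eq_of_le hle with h | h
    · obtain ⟨q, qs, hd⟩ : ∃ q qs, qws.drop qi = q :: qs := by
        rcases h' : qws.drop qi with _ | ⟨q, qs⟩
        · exact absurd (List.drop_eq_nil_iff.mp h') (by omega)
        · exact ⟨q, qs, rfl⟩
      simp [hd, pvAllIn, pvConsume, Nat.ne_of_lt h]
    · simp [h, pvAllIn]
  | cons n ns ih =>
    intro qi hle
    simp only [List.foldl]
    by_cases hlt : qi < qws.length
    · obtain ⟨q, qs, hd⟩ : ∃ q qs, qws.drop qi = q :: qs := by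
        rcases h' : qws.drop qi with _ | ⟨q, qs⟩
        · exact absurd (List.drop_eq_nil_iff.mp h') (by omega)
        · exact ⟨q, qs, rfl⟩
      have hq : qws.getD qi "" = q := by
        have h0 : qws[qi] = q := by
          have := congrArg (fun l => l.head?) hd
          simpa [List.head?_drop, List.getElem?_eq_getElem hlt] using this
        simp [List.getD, List.getElem?_eq_getElem hlt, h0]
      have hqs : qws.drop (qi + 1) = qs := by
        have := congrArg (List.drop 1) hd
        simpa [List.drop_drop, Nat.add_comm] using this
      by_cases heq : qws.getD qi "" = n
      · have hqn : n = q := by rw [← heq, hq]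
        rw [if_pos ⟨hlt, heq⟩, ih (qi + 1) (by omega), hqs, hd]
        simp [pvAllIn, pvConsume, hqn]
      · have hne : ¬ (qi < qws.length ∧ qws.getD qi "" = n) := by tauto
        have hnq : n ≠ q := by rw [← hq]; exact fun h => heq h.symm
        rw [if_neg hne, ih qi hle, hd]
        simp only [pvAllIn, pvConsume, if_neg hnq]
    · have hnil : qws.drop qi = [] := List.drop_eq_nil_iff.mpr (by omega)
      have hne : ¬ (qi < qws.length ∧ qws.getD qi "" = n) := by tauto
      rw [if_neg hne, ih qi hle, hnil]
      simp [pvAllIn]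

-- ===== VERDICT (by name: the statement is the Claim_ definition above) =====
theorem preserves_word_order_py_spec : Claim_equal_preserves_word_order_py := by
  intro query name _
  unfold Spec_preserves_word_order_py preserves_word_order_py preserves_word_order_py_alt
  have hA := pv_main (PySem.Str.split₀ query) (PySem.Str.split₀ name) 0 (Nat.zero_le _)
  have hB := pvGoB_eq_pvAllIn (PySem.Str.split₀ name) _
    (fun qw => pvBuild_getD qw (PySem.Str.split₀ name) 0 PySem.Dict.empty |>.trans (by simp))
    (PySem.Str.split₀ query) 0 le_rfl (by simp)
  simp only [List.drop_zero, Int.toNat_zero] at hA hB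
  rw [hA] at *
  exact hB.symm
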